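-- pv_equiv track=rewrite | github.com/lennartpollvogt/markdown-to-data | src/markdown_to_data/to_python/merging_multiline_objects/merge_metadata.py | _validate_metadata_block
-- ===== SOURCE A (Python) =====
-- from typing import List, Dict, Any, Tuple
--
-- def _is_separator(item: Dict[str, Any]) -> bool:
--     """Check if an item is a separator."""
--     return 'separator' in item
--
-- def _is_paragraph(item: Dict[str, Any]) -> bool:
--     """Check if an item is a paragraph."""
--     return 'paragraph' in item
--
-- def _is_empty_paragraph(item: Dict[str, Any]) -> bool:
--     """Check if an item is an empty paragraph."""
--     return _is_paragraph(item) and not item['paragraph'].strip()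
--
-- def _get_separator_type(item: Dict[str, Any]) -> str | None:
--     """Get the separator type if item is a separator."""
--     return item.get('separator') if _is_separator(item) else None
--
-- def _is_valid_key_value_pair(text: str) -> Tuple[bool, Tuple[str, str] | None]:
--     """
--     Check if a string is a valid key-value pair and return the parsed parts.
--     Returns (is_valid, (key, value)) or (is_valid, None)
--     """
--     if ':' not in text:
--         return False, None
--
--     key, value = text.split(':', 1)
--     key = key.strip()
--
--     if not key:  # Empty key is invalid
--         return False, None
--
--     return True, (key, value.strip())
--
-- def _validate_metadata_block(items: List[Dict[str, Any]]) -> bool: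
--     """Validate that the metadata block is properly formed."""
--     if not items:
--         return False
--
--     # Find first non-empty paragraph
--     start_idx = 0
--     while start_idx < len(items) and _is_empty_paragraph(items[start_idx]):
--         start_idx += 1
--
--     if start_idx >= len(items) or not _is_separator(items[start_idx]):
--         return False
--
--     # Get separator type
--     separator_type = _get_separator_type(items[start_idx])
--
--     # Find matching end separator
--     end_idx = start_idx + 1
--     while end_idx < len(items):
--         if _is_separator(items[end_idx]):
--             if _get_separator_type(items[end_idx]) != separator_type:
--                 return False
--             break
--         end_idx += 1
--     else:
--         return False
--
--     # Validate content between separators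
--     for item in items[start_idx + 1:end_idx]:
--         if not _is_paragraph(item):
--             return False
--         if not _is_empty_paragraph(item):
--             is_valid, _ = _is_valid_key_value_pair(item['paragraph'])
--             if not is_valid:
--                 return False
--
--     return True
-- ===== SOURCE B (Python) =====
-- from typing import List, Dict, Any
--
-- def _validate_metadata_block(items: List[Dict[str, Any]]) -> bool:
--     """Single pass with a state variable: seek the opening separator, then validate inline."""
--     sep_type = None
--     in_block = False
--     for item in items:
--         is_sep = 'separator' in item
--         par = item.get('paragraph')
--         if not in_block:
--             if par is not None and not par.strip():
--                 continue                      # skip leading empty paragraphs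
--             if not is_sep:
--                 return False
--             sep_type = item['separator']
--             in_block = True
--         else:
--             if is_sep:
--                 return item['separator'] == sep_type
--             if par is None:
--                 return False
--             if par.strip():
--                 if ':' not in par:
--                     return False
--                 if not par.split(':', 1)[0].strip():
--                     return False
--     return False
-- ===== Notes on version B (the rewrite author's own statement) =====
-- stated objective: simpler
-- what changed: Replaced A's three phases (index scan for the opening separator, index scan for the closing separator, then a re-scan of the slice between them) by one pass over the items with a seeking/in-block state variable that validates content inline.
import Mathlib
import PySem

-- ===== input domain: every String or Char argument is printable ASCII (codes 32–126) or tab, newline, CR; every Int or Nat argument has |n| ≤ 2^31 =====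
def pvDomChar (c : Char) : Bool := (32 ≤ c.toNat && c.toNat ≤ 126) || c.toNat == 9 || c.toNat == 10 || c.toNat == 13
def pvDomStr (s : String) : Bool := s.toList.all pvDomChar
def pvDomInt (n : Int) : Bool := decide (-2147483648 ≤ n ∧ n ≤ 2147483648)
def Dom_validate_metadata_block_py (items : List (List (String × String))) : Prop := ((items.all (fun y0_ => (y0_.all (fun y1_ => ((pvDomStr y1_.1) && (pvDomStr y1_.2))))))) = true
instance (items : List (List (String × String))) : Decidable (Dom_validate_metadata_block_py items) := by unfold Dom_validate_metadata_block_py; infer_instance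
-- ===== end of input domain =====

-- B replaces A's three phased index loops by one state-machine pass that validates inline (simpler decomposition, same cost).

-- ===== PORT A =====
-- dict lookup (first match, as the association-list convention prescribes)
def pvLookup (item : List (String × String)) (k : String) : Option String :=
  (PySem.Dict.mk item).get? k

def pvA_isSep (item : List (String × String)) : Bool := (pvLookup item "separator").isSome

def pvA_isPar (item : List (String × String)) : Bool := (pvLookup item "paragraph").isSome

def pvA_isEmptyPar (item : List (String × String)) : Bool :=
  pvA_isPar item && (PySem.Str.strip ((pvLookup item "paragraph").getD "") == "")

def pvA_sepType (item : List (String × String)) : Option String :=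
  if pvA_isSep item then pvLookup item "separator" else none

def pvA_isValidKV (text : String) : Bool :=
  if !(PySem.Str.isIn ":" text) then false
  else
    match PySem.Str.splitMax? text ":" 1 with
    | some [key, _value] => !(PySem.Str.strip key == "")
    | _ => false   -- unreachable: split(':',1) with ':' present yields exactly two pieces

-- while start_idx < len(items) and _is_empty_paragraph(items[start_idx]): start_idx += 1
-- (structural recursion on a fuel counter = the remaining length, a pure totality device)
def pvA_findStartAux (items : List (List (String × String))) : Nat → Nat → Nat
  | 0, i => i
  | fuel + 1, i =>
    if h : i < items.length then
      if pvA_isEmptyPar items[i] then pvA_findStartAux items fuel (i + 1) else i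
    else i

def pvA_findStart (items : List (List (String × String))) (i : Nat) : Nat :=
  pvA_findStartAux items (items.length - i) i

-- the end_idx while-loop: none = the loop returned False or fell through its else
def pvA_findEndAux (items : List (List (String × String))) (sepType : Option String) :
    Nat → Nat → Option Nat
  | 0, _ => none
  | fuel + 1, i =>
    if h : i < items.length then
      if pvA_isSep items[i] then
        if pvA_sepType items[i] != sepType then none else some i
      else pvA_findEndAux items sepType fuel (i + 1)
    else none

def pvA_findEnd (items : List (List (String × String))) (sepType : Option String) (i : Nat) :
    Option Nat :=
  pvA_findEndAux items sepType (items.length - i) i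

-- for item in items[start_idx+1:end_idx]: …
def pvA_checkContent : List (List (String × String)) → Bool
  | [] => true
  | item :: rest =>
    if !pvA_isPar item then false
    else if !pvA_isEmptyPar item then
      if pvA_isValidKV ((pvLookup item "paragraph").getD "") then pvA_checkContent rest
      else false
    else pvA_checkContent rest

def validate_metadata_block_py (items : List (List (String × String))) : Bool :=
  if items.isEmpty then false
  else
    let s := pvA_findStart items 0
    if _h : s < items.length then
      if !pvA_isSep items[s] then false
      else
        match pvA_findEnd items (pvA_sepType items[s]) (s + 1) with
        | none => false
        | some e =>
          pvA_checkContent (PySem.List.slice items (some ((s : Int) + 1)) (some (e : Int)))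
    else false

-- ===== PORT B =====
-- state: none = seeking the opening separator, some t = inside a block opened by separator type t
def pvB_go (state : Option String) : List (List (String × String)) → Bool
  | [] => false
  | item :: rest =>
    let isSep := (pvLookup item "separator").isSome
    let par := pvLookup item "paragraph"
    match state with
    | none =>
      if (match par with | some p => PySem.Str.strip p == "" | none => false) then
        pvB_go none rest
      else if !isSep then false
      else pvB_go (pvLookup item "separator") rest
    | some t =>
      if isSep then
        match pvLookup item "separator" with
        | some v => v == t
        | none => false   -- unreachable under isSep
      else
        match par with
        | none => false
        | some p =>
          if !(PySem.Str.strip p == "") then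
            if !(PySem.Str.isIn ":" p) then false
            else
              match PySem.Str.splitMax? p ":" 1 with
              | some [key, _value] =>
                if PySem.Str.strip key == "" then false else pvB_go (some t) rest
              | _ => false   -- unreachable: ':' is in p, so split(':',1) yields two pieces
          else pvB_go (some t) rest

def validate_metadata_block_py_alt (items : List (List (String × String))) : Bool :=
  pvB_go none items

-- ===== PRECONDITION & SPEC =====
def Spec_validate_metadata_block_py (items : List (List (String × String))) (out : Bool) : Prop := out = validate_metadata_block_py_alt items
instance (items : List (List (String × String))) (out : Bool) : Decidable (Spec_validate_metadata_block_py items out) := by unfold Spec_validate_metadata_block_py; infer_instance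

-- ===== CLAIM (what is proved, stated in full; the proofs are below) =====
def Claim_equal_validate_metadata_block_py : Prop := ∀ (items : List (List (String × String))), Dom_validate_metadata_block_py items → Spec_validate_metadata_block_py items (validate_metadata_block_py items)

-- ===== LEMMAS AND PROOFS =====

-- the per-item validation step: A's loop body over the slice = B's in-block paragraph branch
lemma pv_step_eq (item : List (String × String)) (c : Bool) :
    (if !pvA_isPar item then false
     else if !pvA_isEmptyPar item then
       if pvA_isValidKV ((pvLookup item "paragraph").getD "") then c else false
     else c)
    = (match pvLookup item "paragraph" with
       | none => false
       | some p =>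
         if !(PySem.Str.strip p == "") then
           if !(PySem.Str.isIn ":" p) then false
           else
             match PySem.Str.splitMax? p ":" 1 with
             | some [key, _] => if PySem.Str.strip key == "" then false else c
             | _ => false
         else c) := by
  rcases hp : pvLookup item "paragraph" with _ | p
  · simp [pvA_isPar, hp]
  · have hpar : pvA_isPar item = true := by simp [pvA_isPar, hp]
    by_cases hemp : PySem.Str.strip p == ""
    · have he : pvA_isEmptyPar item = true := by simp [pvA_isEmptyPar, hpar, hp, hemp]
      simp [hpar, he, hemp]
    · have hB : (PySem.Str.strip p == "") = false := by simpa using hemp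
      have he : pvA_isEmptyPar item = false := by simp [pvA_isEmptyPar, hpar, hp, hB]
      simp only [hpar, he, Bool.not_true, Bool.not_false, if_false, if_true, hB,
        Bool.false_eq_true]
      simp only [Option.getD_some]
      unfold pvA_isValidKV
      by_cases hin : PySem.Str.isIn ":" p
      · simp only [hin, Bool.not_true, if_false, Bool.false_eq_true]
        rcases hsp : PySem.Str.splitMax? p ":" 1 with _ | l
        · simp
        · rcases l with _ | ⟨k, l⟩
          · simp
          · rcases l with _ | ⟨w, l⟩
            · simp
            · rcases l with _ | _
              · simp only
                split_ifs with hk <;> simp_all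
              · simp
      · have hin1 : PySem.Chars.isIn [':'] p.toList = false := by
          simpa using hin
        simp [hin1]

lemma pv_step_false (item : List (String × String)) :
    (if !pvA_isPar item then false
     else if !pvA_isEmptyPar item then
       if pvA_isValidKV ((pvLookup item "paragraph").getD "") then false else false
     else false) = false := by
  split_ifs <;> rfl

lemma pvA_findStart_lt (items : List (List (String × String))) (i : Nat)
    (h : i < items.length) :
    pvA_findStart items i
      = if pvA_isEmptyPar items[i] then pvA_findStart items (i + 1) else i := by
  unfold pvA_findStart
  rw [show items.length - i = (items.length - (i + 1)) + 1 from by omega]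
  simp [pvA_findStartAux, h]

lemma pvA_findStart_ge (items : List (List (String × String))) (i : Nat)
    (h : ¬ i < items.length) : pvA_findStart items i = i := by
  unfold pvA_findStart
  rw [show items.length - i = 0 from by omega]
  rfl

lemma pvA_findEnd_lt (items : List (List (String × String))) (t : Option String) (i : Nat)
    (h : i < items.length) :
    pvA_findEnd items t i
      = if pvA_isSep items[i] then
          if pvA_sepType items[i] != t then none else some i
        else pvA_findEnd items t (i + 1) := by
  unfold pvA_findEnd
  rw [show items.length - i = (items.length - (i + 1)) + 1 from by omega]
  simp [pvA_findEndAux, h]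

lemma pvA_findEnd_ge (items : List (List (String × String))) (t : Option String) (i : Nat)
    (h : ¬ i < items.length) : pvA_findEnd items t i = none := by
  unfold pvA_findEnd
  rw [show items.length - i = 0 from by omega]
  rfl

lemma pvA_findEnd_bounds (items : List (List (String × String))) (t : Option String) :
    ∀ i e, pvA_findEnd items t i = some e → i ≤ e ∧ e < items.length := by
  intro i
  induction hn : items.length - i using Nat.strong_induction_on generalizing i with
  | _ n ih =>
    intro e he
    by_cases h : i < items.length
    · rw [pvA_findEnd_lt items t i h] at he
      by_cases hs : pvA_isSep items[i]
      · simp only [hs, if_true] at he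
        split_ifs at he with hm <;> simp_all <;> omega
      · simp only [hs, Bool.false_eq_true, if_false] at he
        have := ih (items.length - (i + 1)) (by omega) (i + 1) rfl e he
        exact ⟨by omega, this.2⟩
    · rw [pvA_findEnd_ge items t i h] at he
      simp at he

lemma pvB_inblock (items : List (List (String × String))) (v : String) :
    ∀ i, i ≤ items.length →
      (match pvA_findEnd items (some v) i with
        | none => false
        | some e => pvA_checkContent (PySem.List.slice items (some (i : Int)) (some (e : Int))))
      = pvB_go (some v) (items.drop i) := by
  intro i
  induction hn : items.length - i using Nat.strong_induction_on generalizing i with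
  | _ n ih =>
    intro hi
    by_cases h : i < items.length
    · have hdrop : items.drop i = items[i] :: items.drop (i + 1) :=
        (List.getElem_cons_drop h).symm
      rw [pvA_findEnd_lt items (some v) i h, hdrop]
      by_cases hs : pvA_isSep items[i]
      · -- a separator closes (or mismatches) the block
        have hsome : ∃ w, pvLookup items[i] "separator" = some w := by
          rcases hv : pvLookup items[i] "separator" with _ | w
          · exact absurd hs (by simp [pvA_isSep, hv])
          · exact ⟨w, rfl⟩
        rcases hsome with ⟨w, hw⟩
        have hst : pvA_sepType items[i] = some w := by simp [pvA_sepType, hs, hw]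
        simp only [hs, if_true, hst]
        by_cases hwv : w = v
        · subst hwv
          simp only [bne_self_eq_false, Bool.false_eq_true, if_false]
          have hslice : PySem.List.slice items (some (i : Int)) (some (i : Int)) = [] := by
            rw [PySem.List.slice_natCast]; simp
          simp [hslice, pvA_checkContent, pvB_go, hw]
        · have hne : (some w != some v) = true := by simp [hwv]
          simp [hne, pvB_go, hw, hwv]
      · -- not a separator: a content item, then recurse
        have hs0 : pvA_isSep items[i] = false := by simpa using hs
        have hs1 : (pvLookup items[i] "separator").isSome = false := by
          simpa [pvA_isSep] using hs0
        simp only [hs0, Bool.false_eq_true, if_false]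
        have hIH := ih (items.length - (i + 1)) (by omega) (i + 1) rfl (by omega)
        have hBhead : pvB_go (some v) (items[i] :: items.drop (i + 1))
            = (match pvLookup items[i] "paragraph" with
               | none => false
               | some p =>
                 if !(PySem.Str.strip p == "") then
                   if !(PySem.Str.isIn ":" p) then false
                   else
                     match PySem.Str.splitMax? p ":" 1 with
                     | some [key, _] =>
                       if PySem.Str.strip key == "" then false
                       else pvB_go (some v) (items.drop (i + 1))
                     | _ => false
                 else pvB_go (some v) (items.drop (i + 1))) := by
          simp only [pvB_go, hs1, Bool.false_eq_true, if_false]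
        rw [hBhead]
        rcases hfe : pvA_findEnd items (some v) (i + 1) with _ | e
        · -- no closing separator later: both sides are false
          rw [hfe] at hIH
          simp only at hIH
          rw [← pv_step_eq items[i] (pvB_go (some v) (items.drop (i + 1))), ← hIH,
            pv_step_false]
        · -- a closing separator at e ≥ i+1: peel items[i] off the slice
          have hbd := pvA_findEnd_bounds items (some v) (i + 1) e hfe
          have hslice : PySem.List.slice items (some (i : Int)) (some (e : Int))
              = items[i] :: PySem.List.slice items (some ((i + 1 : Nat) : Int)) (some (e : Int)) := by
            rw [PySem.List.slice_natCast, PySem.List.slice_natCast, hdrop]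
            have h1 : e - i = (e - (i + 1)) + 1 := by omega
            rw [h1, List.take_succ_cons]
          rw [hfe] at hIH
          simp only at hIH
          simp only [hslice, pvA_checkContent]
          rw [hIH, pv_step_eq]
    · have : i = items.length := by omega
      subst this
      rw [pvA_findEnd_ge items (some v) items.length (by omega)]
      simp [pvB_go]

lemma pvB_seek (items : List (List (String × String))) :
    ∀ i, i ≤ items.length →
      (let s := pvA_findStart items i
        if _h : s < items.length then
          if !pvA_isSep items[s] then false
          else
            match pvA_findEnd items (pvA_sepType items[s]) (s + 1) with
            | none => false
            | some e =>
              pvA_checkContent (PySem.List.slice items (some ((s : Int) + 1)) (some (e : Int)))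
        else false)
      = pvB_go none (items.drop i) := by
  intro i
  induction hn : items.length - i using Nat.strong_induction_on generalizing i with
  | _ n ih =>
    intro hi
    by_cases h : i < items.length
    · have hdrop : items.drop i = items[i] :: items.drop (i + 1) :=
        (List.getElem_cons_drop h).symm
      rw [hdrop]
      by_cases hemp : pvA_isEmptyPar items[i]
      · -- leading empty paragraph: both sides skip it
        have hfs : pvA_findStart items i = pvA_findStart items (i + 1) := by
          rw [pvA_findStart_lt items i h, if_pos hemp]
        have hskip : (match pvLookup items[i] "paragraph" with
            | some p => PySem.Str.strip p == "" | none => false) = true := by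
          rcases hp : pvLookup items[i] "paragraph" with _ | p
          · simp [pvA_isEmptyPar, pvA_isPar, hp] at hemp
          · simp only [pvA_isEmptyPar, pvA_isPar, hp, Option.isSome_some, Bool.true_and,
              Option.getD_some] at hemp
            simpa using hemp
        simp only [pvB_go, hskip, if_true]
        rw [← ih (items.length - (i + 1)) (by omega) (i + 1) rfl (by omega)]
        simp only [hfs]
      · -- first non-empty item: the start scan stops here
        have hemp0 : pvA_isEmptyPar items[i] = false := by simpa using hemp
        have hfs : pvA_findStart items i = i := by
          rw [pvA_findStart_lt items i h]; simp [hemp0]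
        have hskip : (match pvLookup items[i] "paragraph" with
            | some p => PySem.Str.strip p == "" | none => false) = false := by
          rcases hp : pvLookup items[i] "paragraph" with _ | p
          · simp
          · simp only [pvA_isEmptyPar, pvA_isPar, hp, Option.isSome_some, Bool.true_and,
              Option.getD_some] at hemp0
            simpa using hemp0
        simp only [hfs, h, dite_true, pvB_go, hskip, Bool.false_eq_true, if_false]
        by_cases hs : pvA_isSep items[i]
        · have hsome : ∃ w, pvLookup items[i] "separator" = some w := by
            rcases hv : pvLookup items[i] "separator" with _ | w
            · exact absurd hs (by simp [pvA_isSep, hv])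
            · exact ⟨w, rfl⟩
          rcases hsome with ⟨w, hw⟩
          have hst : pvA_sepType items[i] = some w := by simp [pvA_sepType, hs, hw]
          have hs1 : (pvLookup items[i] "separator").isSome = true := by
            simp [hw]
          simp only [hs, Bool.not_true, Bool.false_eq_true, if_false, hst,
            Bool.not_true, hw]
          rw [← pvB_inblock items w (i + 1) (by omega)]
          have hc : ((i : Int) + 1) = ((i + 1 : Nat) : Int) := by push_cast; ring
          rw [hc]
          simp
        · have hs0 : pvA_isSep items[i] = false := by simpa using hs
          have hs1 : (pvLookup items[i] "separator").isSome = false := by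
            simpa [pvA_isSep] using hs0
          simp [hs0, hs1]
    · have hieq : i = items.length := by omega
      subst hieq
      have hfs : pvA_findStart items items.length = items.length :=
        pvA_findStart_ge items items.length (by omega)
      simp [hfs, pvB_go]

-- ===== VERDICT (by name: the statement is the Claim_ definition above) =====
theorem validate_metadata_block_py_spec : Claim_equal_validate_metadata_block_py := by
  intro items _hdom
  unfold Spec_validate_metadata_block_py validate_metadata_block_py validate_metadata_block_py_alt
  rcases items with _ | ⟨x, xs⟩
  · simp [pvB_go]
  · simp only [List.isEmpty_cons, Bool.false_eq_true, if_false]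
    have := pvB_seek (x :: xs) 0 (by omega)
    simpa using this
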